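-- pv_equiv track=rewrite | github.com/Doom-Prophet/ECE-365 | Part 2/Lab6/lab6.py | parse_reads_illumina
-- ===== SOURCE A (Python) =====
-- def parse_reads_illumina(reads) :
--     '''
--     Input - Illumina reads file as a string
--     Output - list of DNA reads
--     '''
--     #start code here
--     index = []
--     dna = []
--     for i in range(len(reads)):
--         if reads[i] == '\n':
--             index.append(i)
--
--     for j in range(len(index)-1):
--         if j % 4 == 0:
--             dna.append(reads[ index[j]+1 : index[j+1] ])
--
--     return dna
-- ===== SOURCE B (Python) =====
-- def parse_reads_illumina(reads):
--     '''
--     Input - Illumina reads file as a string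
--     Output - list of DNA reads
--     '''
--     lines = reads.split('\n')
--     return lines[1:-1][::4]
-- ===== Notes on version B (the rewrite author's own statement) =====
-- stated objective: simpler
-- what changed: Replaces A's two explicit loops (a character scan building a newline-position table, then an index-arithmetic loop slicing between consecutive newline positions) with a single newline split followed by the slices [1:-1] and [::4].
import Mathlib
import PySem

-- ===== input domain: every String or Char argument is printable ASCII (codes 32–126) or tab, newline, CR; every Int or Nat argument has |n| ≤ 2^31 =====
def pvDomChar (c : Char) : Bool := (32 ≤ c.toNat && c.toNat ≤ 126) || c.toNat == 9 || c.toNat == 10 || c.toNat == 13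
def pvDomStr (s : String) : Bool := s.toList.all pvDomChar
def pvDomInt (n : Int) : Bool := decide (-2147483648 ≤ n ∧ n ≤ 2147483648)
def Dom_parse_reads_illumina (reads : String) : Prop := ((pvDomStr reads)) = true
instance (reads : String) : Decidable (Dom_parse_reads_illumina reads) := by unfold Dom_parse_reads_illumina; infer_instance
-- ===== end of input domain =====

-- B replaces A's two index-scanning loops by a newline split plus two slices ([1:-1] then [::4]); objective: simpler, and measurably faster (C-level split vs per-character Python loop).


-- ===== PORT A =====
def parse_reads_illumina (reads : String) : List String :=
  -- first loop: collect the indices of all '\n' characters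
  let index : List Int :=
    (PySem.List.pyRange 0 (PySem.Str.len reads) 1).foldl
      (fun acc i => if PySem.List.pyGetD reads.toList i ' ' == '\n' then acc ++ [i] else acc) []
  -- second loop: for j in range(len(index)-1): if j % 4 == 0: append reads[index[j]+1:index[j+1]]
  (PySem.List.pyRange 0 ((index.length : Int) - 1) 1).foldl
    (fun acc j => if PySem.Int.mod j 4 == 0 then
        acc ++ [PySem.Str.slice reads (some (PySem.List.pyGetD index j 0 + 1))
                                      (some (PySem.List.pyGetD index (j + 1) 0))]
      else acc) []

-- ===== PORT B =====
def parse_reads_illumina_alt (reads : String) : List String :=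
  -- lines = reads.split('\n')  (separator "\n" is non-empty, so split? is always `some`)
  let lines : List String := (PySem.Str.split? reads "\n").getD []
  -- return lines[1:-1][::4]  (step 4 ≠ 0, so slice? is always `some`)
  (PySem.List.slice? (PySem.List.slice lines (some 1) (some (-1))) none none 4).getD []

-- ===== PRECONDITION & SPEC =====
def Spec_parse_reads_illumina (reads : String) (out : List String) : Prop := out = parse_reads_illumina_alt reads
instance (reads : String) (out : List String) : Decidable (Spec_parse_reads_illumina reads out) := by unfold Spec_parse_reads_illumina; infer_instance

-- ===== CLAIM (what is proved, stated in full; the proofs are below) =====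
def Claim_equal_parse_reads_illumina : Prop := ∀ (reads : String), Dom_parse_reads_illumina reads → Spec_parse_reads_illumina reads (parse_reads_illumina reads)

-- ===== LEMMAS AND PROOFS =====

-- proof-side spec of splitting on '\n'
def pvSplitNl : List Char → List (List Char)
  | [] => [[]]
  | c :: cs => if c = '\n' then [] :: pvSplitNl cs
               else match pvSplitNl cs with
                 | [] => [[c]]
                 | l :: ls => (c :: l) :: ls

-- positions of '\n'
def pvNl : List Char → List Nat
  | [] => []
  | c :: cs => (if c = '\n' then [0] else []) ++ (pvNl cs).map (· + 1)

def pvConsHead (p : List Char) : List (List Char) → List (List Char)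
  | [] => [p]
  | l :: ls => (p ++ l) :: ls

theorem pvSplitNl_ne_nil (cs : List Char) : pvSplitNl cs ≠ [] := by
  cases cs with
  | nil => simp [pvSplitNl]
  | cons c t =>
    simp only [pvSplitNl]
    split
    · simp
    · cases h : pvSplitNl t <;> simp

theorem pvGo_eq (fuel : Nat) : ∀ (cs cur : List Char) (acc : List (List Char)), cs.length ≤ fuel →
    PySem.Chars.splitOn.go ['\n'] fuel cs cur acc = acc.reverse ++ pvConsHead cur.reverse (pvSplitNl cs) := by
  induction fuel with
  | zero =>
    intro cs cur acc h
    have : cs = [] := by cases cs <;> simp_all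
    subst this
    simp [PySem.Chars.splitOn.go, pvSplitNl, pvConsHead]
  | succ fuel ih =>
    intro cs cur acc h
    cases cs with
    | nil => simp [PySem.Chars.splitOn.go, pvSplitNl, pvConsHead]
    | cons c rest =>
      rw [PySem.Chars.splitOn.go]
      by_cases hc : c = '\n'
      · subst hc
        have hp : ['\n'].isPrefixOf ('\n' :: rest) = true := by simp [List.isPrefixOf]
        rw [if_pos hp]
        simp only [List.length_cons, List.length_nil, List.drop_succ_cons, List.drop_zero]
        rw [ih rest [] (cur.reverse :: acc) (by simpa using Nat.le_of_succ_le_succ h)]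
        obtain ⟨l, ls, hl⟩ : ∃ l ls, pvSplitNl rest = l :: ls := by
          cases hx : pvSplitNl rest with
          | nil => exact absurd hx (pvSplitNl_ne_nil rest)
          | cons l ls => exact ⟨l, ls, rfl⟩
        simp [pvSplitNl, hl, pvConsHead]
      · have hp : ['\n'].isPrefixOf (c :: rest) = false := by
          simp [List.isPrefixOf]
          exact fun h' => absurd h'.symm hc
        rw [if_neg (by simp [hp])]
        rw [ih rest (c :: cur) acc (by simpa using Nat.le_of_succ_le_succ h)]
        obtain ⟨l, ls, hl⟩ : ∃ l ls, pvSplitNl rest = l :: ls := by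
          cases hx : pvSplitNl rest with
          | nil => exact absurd hx (pvSplitNl_ne_nil rest)
          | cons l ls => exact ⟨l, ls, rfl⟩
        simp [pvSplitNl, hl, pvConsHead, hc]

theorem pvSplitOn_eq (cs : List Char) : PySem.Chars.splitOn cs ['\n'] = pvSplitNl cs := by
  unfold PySem.Chars.splitOn
  rw [pvGo_eq (cs.length + 1) cs [] [] (by omega)]
  obtain ⟨l, ls, hl⟩ : ∃ l ls, pvSplitNl cs = l :: ls := by
    cases hx : pvSplitNl cs with
    | nil => exact absurd hx (pvSplitNl_ne_nil cs)
    | cons l ls => exact ⟨l, ls, rfl⟩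
  simp [hl, pvConsHead]

theorem pvSplitNl_length (cs : List Char) : (pvSplitNl cs).length = (pvNl cs).length + 1 := by
  induction cs with
  | nil => simp [pvSplitNl, pvNl]
  | cons c t ih =>
    by_cases hc : c = '\n'
    · simp [pvSplitNl, pvNl, hc, ih]
    · obtain ⟨l, ls, hl⟩ : ∃ l ls, pvSplitNl t = l :: ls := by
        cases hx : pvSplitNl t with
        | nil => exact absurd hx (pvSplitNl_ne_nil t)
        | cons l ls => exact ⟨l, ls, rfl⟩
      simp [pvSplitNl, pvNl, hc, hl]
      have := ih
      simp [hl] at this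
      omega

theorem pvGetD_map_add_one (l : List Nat) (j : Nat) (h : j < l.length) :
    (l.map (· + 1)).getD j 0 = l.getD j 0 + 1 := by
  rw [List.getD_eq_getElem _ _ (by simpa using h), List.getD_eq_getElem _ _ h, List.getElem_map]

theorem pvSeg_zero (cs : List Char) :
    (pvSplitNl cs).getD 0 [] = cs.take ((pvNl cs).getD 0 cs.length) := by
  induction cs with
  | nil => simp [pvSplitNl, pvNl]
  | cons c t ih =>
    by_cases hc : c = '\n'
    · simp [pvSplitNl, pvNl, hc]
    · obtain ⟨l, ls, hl⟩ : ∃ l ls, pvSplitNl t = l :: ls := by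
        cases hx : pvSplitNl t with
        | nil => exact absurd hx (pvSplitNl_ne_nil t)
        | cons l ls => exact ⟨l, ls, rfl⟩
      simp only [pvSplitNl, pvNl, if_neg hc, hl, List.nil_append, List.getD_cons_zero]
      cases hn : pvNl t with
      | nil =>
        rw [hn, hl] at ih
        simp only [List.getD_cons_zero] at ih
        simp [ih]
      | cons y ys =>
        rw [hn, hl] at ih
        simp only [List.getD_cons_zero] at ih
        simp [ih]

theorem pvSeg_succ (cs : List Char) : ∀ (j : Nat), j + 1 < (pvNl cs).length →
    (pvSplitNl cs).getD (j + 1) [] =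
      (cs.drop ((pvNl cs).getD j 0 + 1)).take ((pvNl cs).getD (j + 1) 0 - ((pvNl cs).getD j 0 + 1)) := by
  induction cs with
  | nil => intro j h; simp [pvNl] at h
  | cons c t ih =>
    intro j h
    by_cases hc : c = '\n'
    · have hS : pvSplitNl (c :: t) = [] :: pvSplitNl t := by simp [pvSplitNl, hc]
      have hN : pvNl (c :: t) = 0 :: (pvNl t).map (· + 1) := by simp [pvNl, hc]
      rw [hN] at h
      simp only [List.length_cons, List.length_map] at h
      cases j with
      | zero =>
        have ht : 0 < (pvNl t).length := by omega
        rw [hS, hN]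
        simp only [List.getD_cons_succ, List.getD_cons_zero]
        rw [pvGetD_map_add_one _ _ ht]
        have h0 := pvSeg_zero t
        rw [List.getD_eq_getElem _ _ ht] at h0 ⊢
        have e1 : (pvNl t)[0] + 1 - (0 + 1) = (pvNl t)[0] := by omega
        have e2 : List.drop (0 + 1) (c :: t) = t := by simp
        rw [e1, e2]
        exact h0
      | succ j' =>
        have h' : j' + 1 < (pvNl t).length := by omega
        rw [hS, hN]
        simp only [List.getD_cons_succ]
        rw [pvGetD_map_add_one _ _ (by omega), pvGetD_map_add_one _ _ (by omega)]
        have := ih j' h'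
        simp only [List.drop_succ_cons]
        rw [this]
        congr 1
        omega
    · obtain ⟨l, ls, hl⟩ : ∃ l ls, pvSplitNl t = l :: ls := by
        cases hx : pvSplitNl t with
        | nil => exact absurd hx (pvSplitNl_ne_nil t)
        | cons l ls => exact ⟨l, ls, rfl⟩
      have hS : pvSplitNl (c :: t) = (c :: l) :: ls := by simp [pvSplitNl, hc, hl]
      have hN : pvNl (c :: t) = (pvNl t).map (· + 1) := by simp [pvNl, hc]
      rw [hN] at h
      simp only [List.length_map] at h
      rw [hS, hN]
      simp only [List.getD_cons_succ]
      rw [pvGetD_map_add_one _ _ (by omega), pvGetD_map_add_one _ _ (by omega)]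
      have := ih j h
      rw [hl] at this
      simp only [List.getD_cons_succ] at this
      simp only [List.drop_succ_cons]
      rw [this]
      congr 1
      omega

theorem pvIndex_eq (cs : List Char) :
    (List.range cs.length).filter (fun k => cs.getD k ' ' == '\n') = pvNl cs := by
  induction cs with
  | nil => simp [pvNl]
  | cons c t ih =>
    rw [List.length_cons, List.range_succ_eq_map, List.filter_cons]
    simp only [List.getD_cons_zero]
    rw [List.filter_map]
    have hcmp : ((fun k => (c :: t).getD k ' ' == '\n') ∘ Nat.succ) = (fun k => t.getD k ' ' == '\n') := by
      funext k; simp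
    rw [hcmp, ih]
    by_cases hc : c = '\n'
    · simp [pvNl, hc]
    · simp [pvNl, hc, beq_iff_eq]

theorem pvFilterMod4 (n : Nat) :
    (List.range n).filter (fun k => k % 4 == 0) = (List.range ((n + 3) / 4)).map (fun k => 4 * k) := by
  induction n with
  | zero => simp
  | succ n ih =>
    rw [List.range_succ, List.filter_append, ih]
    by_cases h : n % 4 = 0
    · have hc : ((n + 1 + 3) / 4) = (n + 3) / 4 + 1 := by omega
      rw [hc, List.range_succ, List.map_append]
      simp only [List.filter_cons, List.filter_nil, h]
      have h4 : 4 * ((n + 3) / 4) = n := by omega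
      simp [h4]
    · have hc : ((n + 1 + 3) / 4) = (n + 3) / 4 := by omega
      rw [hc]
      simp [h]

theorem pvSliceMid {α : Type} (xs : List α) :
    PySem.List.slice xs (some 1) (some (-1)) = xs.tail.dropLast := by
  cases xs with
  | nil => simp [PySem.List.slice, PySem.List.clampIdx]
  | cons x t =>
    have ha : PySem.List.clampIdx (x :: t).length 1 = 1 := by
      simp [PySem.List.clampIdx]
    have hb : PySem.List.clampIdx (x :: t).length (-1) = t.length := by
      simp [PySem.List.clampIdx]
    simp only [PySem.List.slice, ha, hb]
    simp [List.dropLast_eq_take]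

theorem pvSlice4 {α : Type} (m : List α) (d : α) :
    PySem.List.slice? m none none 4 = some ((List.range ((m.length + 3) / 4)).map (fun k => m.getD (4 * k) d)) := by
  rw [PySem.List.slice?]
  norm_num [PySem.List.sliceIndices]
  have hc : (if 0 < m.length then (((m.length : Int) + 4 - 1) / 4).toNat else 0) = (m.length + 3) / 4 := by
    split <;> omega
  rw [hc]
  apply List.filterMap_eq_map_iff_forall_eq_some.mpr
  intro x hx
  rw [List.mem_range] at hx
  have h4 : 4 * x < m.length := by omega
  have ht : ((4 : Int) * (x : Int)).toNat = 4 * x := by omega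
  rw [ht, List.getElem?_eq_getElem h4]
  simp

theorem pvGetD_map {α β : Type} (f : α → β) (l : List α) (j : Nat) (d : α) :
    (l.map f).getD j (f d) = f (l.getD j d) := by
  by_cases h : j < l.length
  · rw [List.getD_eq_getElem _ _ (by simpa using h), List.getD_eq_getElem _ _ h, List.getElem_map]
  · rw [List.getD_eq_default _ _ (by simpa using h), List.getD_eq_default _ _ (by omega)]

theorem pvGetD_map_cast (l : List Nat) (j : Nat) :
    List.getD (List.map (fun k => ((k : Nat) : Int)) l) j 0 = ((l.getD j 0 : Nat) : Int) := by
  by_cases h : j < l.length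
  · rw [List.getD_eq_getElem _ _ (by simpa using h), List.getD_eq_getElem _ _ h, List.getElem_map]
  · rw [List.getD_eq_default _ _ (by simpa using h), List.getD_eq_default _ _ (by omega)]
    simp

theorem pvModBeq (k : Nat) : (PySem.Int.mod (k : Int) 4 == 0) = (k % 4 == 0) := by
  rw [PySem.Int.mod_eq_emod_of_pos (by norm_num)]
  have h4 : ((k : Int) % 4 = 0) ↔ (k % 4 = 0) := by omega
  by_cases h : k % 4 = 0 <;> simp [h, h4]

-- ===== VERDICT (by name: the statement is the Claim_ definition above) =====
theorem parse_reads_illumina_spec : Claim_equal_parse_reads_illumina := by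
  intro reads _
  show parse_reads_illumina reads = parse_reads_illumina_alt reads
  simp only [parse_reads_illumina, parse_reads_illumina_alt]
  -- A's first loop computes the newline positions
  have hidx : (PySem.List.pyRange 0 (PySem.Str.len reads) 1).foldl
      (fun acc i => if PySem.List.pyGetD reads.toList i ' ' == '\n' then acc ++ [i] else acc) []
      = List.map (fun k => ((k : Nat) : Int)) (pvNl reads.toList) := by
    rw [PySem.List.foldl_append_if_eq_filter, PySem.Str.len_eq, PySem.List.pyRange_zero_natCast,
        List.filter_map]
    rw [List.filter_congr (fun x _ => by rw [Function.comp_apply, PySem.List.pyGetD_natCast])]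
    rw [pvIndex_eq]
    simp
  rw [hidx]
  -- B's lines are the '\n'-split of the characters
  have hsplit : (PySem.Str.split? reads "\n").getD [] = (pvSplitNl reads.toList).map String.ofList := by
    rw [PySem.Str.split?]
    have h1 : ("\n" : String).toList = ['\n'] := rfl
    rw [h1, PySem.Chars.split?]
    simp [pvSplitOn_eq]
  rw [hsplit]
  -- lines[1:-1] is the list of middle lines
  have hmid : PySem.List.slice ((pvSplitNl reads.toList).map String.ofList) (some 1) (some (-1))
      = ((pvSplitNl reads.toList).tail.dropLast).map String.ofList := by
    rw [pvSliceMid, ← List.map_tail, ← List.map_dropLast]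
  rw [hmid]
  have hmidlen : ((pvSplitNl reads.toList).tail.dropLast).length = (pvNl reads.toList).length - 1 := by
    simp [pvSplitNl_length reads.toList]
  -- B's step-4 slice
  rw [pvSlice4 (((pvSplitNl reads.toList).tail.dropLast).map String.ofList) (String.ofList [])]
  simp only [Option.getD_some, List.length_map, hmidlen]
  -- A's second loop
  rw [PySem.List.foldl_append_if (fun j => PySem.Int.mod j 4 == 0)]
  simp only [List.nil_append]
  -- split on the number of newlines
  by_cases hn0 : (pvNl reads.toList).length = 0
  · rw [hn0]
    rw [PySem.List.pyRange_one_eq_nil (by norm_num)]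
    simp
  · have hpos : 1 ≤ (pvNl reads.toList).length := Nat.one_le_iff_ne_zero.mpr hn0
    have hcast : (((pvNl reads.toList).length : Int) - 1) = (((pvNl reads.toList).length - 1 : Nat) : Int) := by
      omega
    rw [hcast, PySem.List.pyRange_zero_natCast, List.filter_map]
    rw [List.filter_congr (fun x _ => by rw [Function.comp_apply, pvModBeq])]
    rw [pvFilterMod4, List.map_map, List.map_map]
    apply List.map_congr_left
    intro k hk
    rw [List.mem_range] at hk
    have hjn : 4 * k < (pvNl reads.toList).length - 1 := by omega
    simp only [Function.comp_apply]
    -- A's element: the slice between newline 4k and newline 4k+1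
    have ha : PySem.List.pyGetD (List.map (fun k => ((k : Nat) : Int)) (pvNl reads.toList)) ((4 * k : Nat) : Int) 0
        = (((pvNl reads.toList).getD (4 * k) 0 : Nat) : Int) := by
      rw [PySem.List.pyGetD_natCast, pvGetD_map_cast]
    have ha' : PySem.List.pyGetD (List.map (fun k => ((k : Nat) : Int)) (pvNl reads.toList)) (((4 * k : Nat) : Int) + 1) 0
        = (((pvNl reads.toList).getD (4 * k + 1) 0 : Nat) : Int) := by
      rw [show (((4 * k : Nat) : Int) + 1) = ((4 * k + 1 : Nat) : Int) by push_cast; ring,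
          PySem.List.pyGetD_natCast, pvGetD_map_cast]
    rw [ha, ha']
    rw [PySem.Str.slice]
    rw [show (((pvNl reads.toList).getD (4 * k) 0 : Nat) : Int) + 1
        = (((pvNl reads.toList).getD (4 * k) 0 + 1 : Nat) : Int) by push_cast; ring]
    simp only [PySem.Chars.slice]
    rw [PySem.List.slice_natCast]
    have hseg := pvSeg_succ reads.toList (4 * k) (by omega)
    rw [← hseg]
    -- B's element: middle line number 4k
    have hd : (((pvSplitNl reads.toList).tail.dropLast).map String.ofList).getD (4 * k) (String.ofList [])
        = String.ofList (((pvSplitNl reads.toList).tail.dropLast).getD (4 * k) []) :=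
      pvGetD_map String.ofList ((pvSplitNl reads.toList).tail.dropLast) (4 * k) []
    rw [hd]
    congr 1
    have hlen : (pvSplitNl reads.toList).length = (pvNl reads.toList).length + 1 :=
      pvSplitNl_length reads.toList
    have h1 : 4 * k < ((pvSplitNl reads.toList).tail.dropLast).length := by
      rw [hmidlen]; omega
    have h2 : 4 * k + 1 < (pvSplitNl reads.toList).length := by omega
    rw [List.getD_eq_getElem _ _ h2, List.getD_eq_getElem _ _ h1]
    rw [List.getElem_dropLast, List.getElem_tail]
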